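-- pv_equiv track=rewrite | github.com/lamdt1/bingart | bingart/bingart.py | scan_cookies
-- ===== SOURCE A (Python) =====
-- def scan_cookies(cookies):
--     auth_cookie_U = auth_cookie_KievRPSSecAuth = None
--     for cookie in cookies:
--         if cookie['domain'] == '.bing.com':
--             if cookie['name'] == '_U':
--                 auth_cookie_U = cookie['value']
--             elif cookie['name'] == 'KievRPSSecAuth':
--                 auth_cookie_KievRPSSecAuth = cookie['value']
--     return auth_cookie_U, auth_cookie_KievRPSSecAuth
-- ===== SOURCE B (Python) =====
-- def scan_cookies(cookies):
--     def last_value(name):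
--         for cookie in reversed(cookies):
--             if cookie['domain'] == '.bing.com' and cookie['name'] == name:
--                 return cookie['value']
--         return None
--     return last_value('_U'), last_value('KievRPSSecAuth')
-- ===== Notes on version B (the rewrite author's own statement) =====
-- stated objective: alternative
-- what changed: Replaces the single forward pass with two last-wins accumulators by two staged back-to-front scans that each return the first (i.e. last-set) matching cookie value and exit early.
import Mathlib
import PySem

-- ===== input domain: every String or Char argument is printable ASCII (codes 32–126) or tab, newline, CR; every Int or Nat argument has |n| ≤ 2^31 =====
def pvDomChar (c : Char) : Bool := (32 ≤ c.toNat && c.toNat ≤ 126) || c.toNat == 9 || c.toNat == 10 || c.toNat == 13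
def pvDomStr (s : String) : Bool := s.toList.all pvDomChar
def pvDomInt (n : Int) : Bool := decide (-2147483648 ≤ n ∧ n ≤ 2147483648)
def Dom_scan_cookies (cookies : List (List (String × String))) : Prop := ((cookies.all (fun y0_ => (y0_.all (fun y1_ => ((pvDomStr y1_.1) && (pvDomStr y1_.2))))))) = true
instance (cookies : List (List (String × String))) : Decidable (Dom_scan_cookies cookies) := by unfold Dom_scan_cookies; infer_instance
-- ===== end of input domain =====

-- B replaces A's single forward pass with two last-wins accumulators by two
-- staged back-to-front scans, each returning the first matching value (alternative).

-- ===== PORT A =====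
def scan_cookies (cookies : List (List (String × String))) : Option String × Option String :=
  cookies.foldl (fun (st : Option String × Option String) cookie =>
    let c := PySem.Dict.ofList cookie
    if c.getD "domain" "" = ".bing.com" then
      if c.getD "name" "" = "_U" then (some (c.getD "value" ""), st.2)
      else if c.getD "name" "" = "KievRPSSecAuth" then (st.1, some (c.getD "value" ""))
      else st
    else st) (none, none)

-- ===== PORT B =====
-- B's helper last_value: scan the reversed list, return the first match (early exit).
def scLastValue (name : String) : List (List (String × String)) → Option String
  | [] => none
  | cookie :: rest =>
    let c := PySem.Dict.ofList cookie
    if c.getD "domain" "" = ".bing.com" ∧ c.getD "name" "" = name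
    then some (c.getD "value" "")
    else scLastValue name rest

def scan_cookies_alt (cookies : List (List (String × String))) : Option String × Option String :=
  (scLastValue "_U" cookies.reverse, scLastValue "KievRPSSecAuth" cookies.reverse)

-- ===== PRECONDITION & SPEC =====
-- Pre_ excludes exactly the inputs on which A raises KeyError: a cookie missing
-- 'domain', or a '.bing.com' cookie missing 'name', or a '.bing.com' cookie named
-- '_U'/'KievRPSSecAuth' missing 'value'.
def Pre_scan_cookies (cookies : List (List (String × String))) : Prop :=
  ∀ cookie ∈ cookies,
    ((PySem.Dict.ofList cookie).get? "domain").isSome = true ∧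
    ((PySem.Dict.ofList cookie).getD "domain" "" = ".bing.com" →
      ((PySem.Dict.ofList cookie).get? "name").isSome = true ∧
      (((PySem.Dict.ofList cookie).getD "name" "" = "_U" ∨
        (PySem.Dict.ofList cookie).getD "name" "" = "KievRPSSecAuth") →
        ((PySem.Dict.ofList cookie).get? "value").isSome = true))
instance (cookies : List (List (String × String))) : Decidable (Pre_scan_cookies cookies) := by
  unfold Pre_scan_cookies; infer_instance
def pvWitness_scan_cookies : (List (List (String × String))) :=
  [[("domain", ".bing.com"), ("name", "_U"), ("value", "u")],
   [("domain", ".bing.com"), ("name", "KievRPSSecAuth"), ("value", "k")]]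

def Spec_scan_cookies (cookies : List (List (String × String))) (out : Option String × Option String) : Prop := out = scan_cookies_alt cookies
instance (cookies : List (List (String × String))) (out : Option String × Option String) : Decidable (Spec_scan_cookies cookies out) := by unfold Spec_scan_cookies; infer_instance

-- ===== CLAIM (what is proved, stated in full; the proofs are below) =====
def Claim_equal_scan_cookies : Prop := ∀ (cookies : List (List (String × String))), Dom_scan_cookies cookies → Pre_scan_cookies cookies → Spec_scan_cookies cookies (scan_cookies cookies)

-- ===== LEMMAS AND PROOFS =====
theorem scLastValue_append_single (name : String) (l : List (List (String × String)))
    (cookie : List (String × String)) :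
    scLastValue name (l ++ [cookie]) =
      (scLastValue name l).or
        (if (PySem.Dict.ofList cookie).getD "domain" "" = ".bing.com" ∧
            (PySem.Dict.ofList cookie).getD "name" "" = name
         then some ((PySem.Dict.ofList cookie).getD "value" "")
         else none) := by
  induction l with
  | nil => simp [scLastValue]
  | cons c rest ih =>
    simp only [List.cons_append, scLastValue]
    by_cases h : (PySem.Dict.ofList c).getD "domain" "" = ".bing.com" ∧
        (PySem.Dict.ofList c).getD "name" "" = name
    · simp [h]
    · simp [h, ih]

-- Loop invariant: A's fold from any state (u, k) yields B's back-to-front first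
-- matches, falling back to (u, k).
theorem scan_cookies_fold_eq (cookies : List (List (String × String)))
    (u k : Option String) :
    cookies.foldl (fun (st : Option String × Option String) cookie =>
      let c := PySem.Dict.ofList cookie
      if c.getD "domain" "" = ".bing.com" then
        if c.getD "name" "" = "_U" then (some (c.getD "value" ""), st.2)
        else if c.getD "name" "" = "KievRPSSecAuth" then (st.1, some (c.getD "value" ""))
        else st
      else st) (u, k)
    = ((scLastValue "_U" cookies.reverse).or u,
       (scLastValue "KievRPSSecAuth" cookies.reverse).or k) := by
  induction cookies generalizing u k with
  | nil => simp only [List.foldl_nil, List.reverse_nil, scLastValue, Option.none_or]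
  | cons cookie rest ih =>
    simp only [List.foldl_cons, List.reverse_cons]
    rw [scLastValue_append_single, scLastValue_append_single, Option.or_assoc, Option.or_assoc]
    by_cases hd : (PySem.Dict.ofList cookie).getD "domain" "" = ".bing.com"
    · by_cases hu : (PySem.Dict.ofList cookie).getD "name" "" = "_U"
      · simp [hd, hu, ih]
      · by_cases hk : (PySem.Dict.ofList cookie).getD "name" "" = "KievRPSSecAuth" <;>
          simp [hd, hu, hk, ih]
    · simp [hd, ih]

-- ===== VERDICT (by name: the statement is the Claim_ definition above) =====
theorem scan_cookies_spec : Claim_equal_scan_cookies := by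
  intro cookies _ _
  unfold Spec_scan_cookies scan_cookies scan_cookies_alt
  simpa using scan_cookies_fold_eq cookies none none
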